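-- pv_equiv track=rewrite | github.com/miriamgrigsby/advent_of_code | 2022/day_3/day3.py | solve_day3_part2
-- ===== SOURCE A (Python) =====
-- from typing import List
-- from functools import reduce
--
-- SlopeInput = List[str]
--
-- def determine_is_tree(slope_row: str, horizontal_position: int) -> int:
--     if slope_row[horizontal_position%len(slope_row)] == '.':
--         return 0
--     return 1
--
-- def solve_day3_part1(slope_input_array: SlopeInput, slope_int: int, vertical_step: int) -> int:
--     total_trees = 0
--     for index in range(len(slope_input_array) - 1):
--         horizontal_position = (index + 1)*slope_int
--         if (index + 1) * vertical_step  > len(slope_input_array) - 1: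
--             break
--         is_tree = determine_is_tree(slope_input_array[(index + 1) * vertical_step ], horizontal_position)
--         total_trees += is_tree
--     return total_trees
--
-- def solve_day3_part2(slope_input_array):
--     arboreal_tuple = [
--         (1,1),
--         (3,1),
--         (5,1),
--         (7,1),
--         (1,2)
--     ]
--
--     total_trees_array = [solve_day3_part1(slope_input_array, slope_int, vertical_step) for slope_int, vertical_step in arboreal_tuple]
--
--     return reduce(lambda acc, total_tree: acc * total_tree, total_trees_array, 1)
-- ===== SOURCE B (Python) =====
-- def solve_day3_part2(slope_input_array):
--     # Row-major single pass: visit each row once and update all five slope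
--     # counters simultaneously, instead of five separate per-slope passes.
--     c1 = c3 = c5 = c7 = c2 = 0
--     i = 1
--     for row in slope_input_array[1:]:
--         w = len(row)
--         if row[(i * 1) % w] != '.':
--             c1 += 1
--         if row[(i * 3) % w] != '.':
--             c3 += 1
--         if row[(i * 5) % w] != '.':
--             c5 += 1
--         if row[(i * 7) % w] != '.':
--             c7 += 1
--         if i % 2 == 0 and row[(i // 2) % w] != '.':
--             c2 += 1
--         i += 1
--     return c1 * c3 * c5 * c7 * c2
-- ===== Notes on version B (the rewrite author's own statement) =====
-- stated objective: faster
-- what changed: A makes five separate slope-major passes (one solve_day3_part1 loop per slope pair, collected by a list comprehension and functools.reduce); B makes a single row-major pass over the grid, visiting each row once and updating all five slope counters simultaneously (the (1,2) slope via a parity test on the row index), then multiplies the counters.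
import Mathlib
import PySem

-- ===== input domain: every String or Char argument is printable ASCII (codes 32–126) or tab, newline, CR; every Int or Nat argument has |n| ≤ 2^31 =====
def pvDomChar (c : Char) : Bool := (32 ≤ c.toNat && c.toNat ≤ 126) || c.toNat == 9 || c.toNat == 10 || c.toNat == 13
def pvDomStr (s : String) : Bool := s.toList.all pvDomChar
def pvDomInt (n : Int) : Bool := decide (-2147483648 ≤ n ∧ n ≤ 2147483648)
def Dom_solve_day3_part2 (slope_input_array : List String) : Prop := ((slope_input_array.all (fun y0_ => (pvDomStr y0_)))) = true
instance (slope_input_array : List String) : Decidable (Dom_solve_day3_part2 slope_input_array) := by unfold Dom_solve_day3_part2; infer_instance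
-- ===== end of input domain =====

-- B makes a single row-major pass updating all five slope counters at once,
-- instead of A's five separate per-slope passes (objective: faster by a constant factor, measured).


-- ===== PORT A =====
def determine_is_tree (slope_row : String) (horizontal_position : Int) : Int :=
  -- slope_row[horizontal_position % len(slope_row)]; getD is never hit inside Pre_
  if (PySem.Str.pyGet? slope_row
        (PySem.Int.mod horizontal_position (PySem.Str.len slope_row))).getD ' ' = '.' then 0
  else 1

def solve_day3_part1_loop (slope_input_array : List String) (slope_int vertical_step : Int) :
    List Int → Int → Int
  | [], total_trees => total_trees
  | index :: rest, total_trees =>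
    let horizontal_position := (index + 1) * slope_int
    if (index + 1) * vertical_step > (slope_input_array.length : Int) - 1 then total_trees
    else
      solve_day3_part1_loop slope_input_array slope_int vertical_step rest
        (total_trees +
          determine_is_tree
            ((PySem.List.pyGet? slope_input_array ((index + 1) * vertical_step)).getD "")
            horizontal_position)

def solve_day3_part1 (slope_input_array : List String) (slope_int vertical_step : Int) : Int :=
  solve_day3_part1_loop slope_input_array slope_int vertical_step
    (PySem.List.pyRange 0 ((slope_input_array.length : Int) - 1) 1) 0

def solve_day3_part2 (slope_input_array : List String) : Int :=
  let arboreal_tuple : List (Int × Int) := [(1,1),(3,1),(5,1),(7,1),(1,2)]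
  let total_trees_array :=
    arboreal_tuple.map (fun p => solve_day3_part1 slope_input_array p.1 p.2)
  total_trees_array.foldl (fun acc total_tree => acc * total_tree) 1

-- ===== PORT B =====
-- 'row[x % w] != "."' of Source B; the getD default is never hit inside Pre_
def isTreeB (row : String) (x : Int) : Bool :=
  (PySem.Str.pyGet? row (PySem.Int.mod x (PySem.Str.len row))).getD ' ' ≠ '.'

-- the for-row loop of Source B: index i (enumerate start=1) and the five counters as state
def rowLoop : List String → Int → Int × Int × Int × Int × Int → Int × Int × Int × Int × Int
  | [], _, cs => cs
  | row :: rest, i, (c1, c3, c5, c7, c2) =>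
    rowLoop rest (i + 1)
      ((if isTreeB row (i * 1) then c1 + 1 else c1),
       (if isTreeB row (i * 3) then c3 + 1 else c3),
       (if isTreeB row (i * 5) then c5 + 1 else c5),
       (if isTreeB row (i * 7) then c7 + 1 else c7),
       (if i % 2 = 0 && isTreeB row (PySem.Int.floordiv i 2) then c2 + 1 else c2))

def solve_day3_part2_alt (slope_input_array : List String) : Int :=
  let cs := rowLoop (slope_input_array.drop 1) 1 (0, 0, 0, 0, 0)
  cs.1 * cs.2.1 * cs.2.2.1 * cs.2.2.2.1 * cs.2.2.2.2

-- ===== PRECONDITION & SPEC =====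
-- Pre_ excludes exactly the inputs where Python A raises: an empty row after the first
-- makes slope_row[h % 0] raise ZeroDivisionError (slope (1,1) visits every row 1..n-1).
def Pre_solve_day3_part2 (slope_input_array : List String) : Prop :=
  ∀ r ∈ slope_input_array.drop 1, r ≠ ""

instance (slope_input_array : List String) : Decidable (Pre_solve_day3_part2 slope_input_array) := by
  unfold Pre_solve_day3_part2; infer_instance

def pvWitness_solve_day3_part2 : List String := ["..##.", "#...#", ".#..."]

def Spec_solve_day3_part2 (slope_input_array : List String) (out : Int) : Prop := out = solve_day3_part2_alt slope_input_array
instance (slope_input_array : List String) (out : Int) : Decidable (Spec_solve_day3_part2 slope_input_array out) := by unfold Spec_solve_day3_part2; infer_instance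

-- ===== CLAIM (what is proved, stated in full; the proofs are below) =====
def Claim_equal_solve_day3_part2 : Prop := ∀ (slope_input_array : List String), Dom_solve_day3_part2 slope_input_array → Pre_solve_day3_part2 slope_input_array → Spec_solve_day3_part2 slope_input_array (solve_day3_part2 slope_input_array)

-- ===== LEMMAS AND PROOFS =====

-- reference count for a vertical_step-1 slope s, rows starting at absolute index i
def refCnt (arr : List String) : List String → Int → Int → Int
  | [], _, _ => 0
  | row :: rest, i, s => (if isTreeB row (i * s) then 1 else 0) + refCnt arr rest (i + 1) s

-- reference count for the (1,2) slope: rows at even absolute index i contribute at column i/2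
def refCnt2 (arr : List String) : List String → Int → Int
  | [], _ => 0
  | row :: rest, i =>
    (if i % 2 = 0 && isTreeB row (PySem.Int.floordiv i 2) then 1 else 0) + refCnt2 arr rest (i + 1)

lemma rowLoop_eq (rows : List String) : ∀ (i c1 c3 c5 c7 c2 : Int) (arr : List String),
    rowLoop rows i (c1, c3, c5, c7, c2) =
      (c1 + refCnt arr rows i 1, c3 + refCnt arr rows i 3, c5 + refCnt arr rows i 5,
       c7 + refCnt arr rows i 7, c2 + refCnt2 arr rows i) := by
  induction rows with
  | nil => intro i c1 c3 c5 c7 c2 arr; simp [rowLoop, refCnt, refCnt2]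
  | cons row rest ih =>
    intro i c1 c3 c5 c7 c2 arr
    simp only [rowLoop, refCnt, refCnt2]
    rw [ih]
    simp only [Prod.mk.injEq]
    refine ⟨?_, ?_, ?_, ?_, ?_⟩ <;> (split <;> ring)

lemma det_eq_isTree (row : String) (h acc : Int) :
    acc + determine_is_tree row h = acc + (if isTreeB row h then 1 else 0) := by
  simp only [determine_is_tree, isTreeB]
  split <;> simp_all

lemma refCnt2_zero (arr : List String) : ∀ (rows : List String) (i : Int),
    (∀ k : Int, i ≤ k → k < i + rows.length → k % 2 ≠ 0) → refCnt2 arr rows i = 0 := by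
  intro rows
  induction rows with
  | nil => intro i _; simp [refCnt2]
  | cons row rest ih =>
    intro i h
    have h0 : i % 2 ≠ 0 := h i le_rfl (by simp)
    simp only [refCnt2]
    rw [ih (i + 1) (fun k hk1 hk2 => h k (by omega) (by simp at hk2 ⊢; omega)),
        if_neg (by simp [h0])]
    ring

lemma drop_toNat_cons (arr : List String) (m : Int) (h0 : 0 ≤ m) (h : m < (arr.length : Int)) :
    arr.drop m.toNat = arr[m.toNat]'(by omega) :: arr.drop (m.toNat + 1) := by
  exact List.drop_eq_getElem_cons (by omega)

lemma pyGetD_eq (arr : List String) (m : Int) (h0 : 0 ≤ m) (h : m < (arr.length : Int)) :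
    (PySem.List.pyGet? arr m).getD "" = arr[m.toNat]'(by omega) := by
  rw [PySem.List.pyGet?_of_nonneg arr h0, List.getElem?_eq_getElem (by omega)]
  rfl

-- A's loop for a vertical_step-1 slope, started at range index j, is the row-major count
lemma loop_eq1 (arr : List String) (s : Int) :
    ∀ (fuel : Nat) (j acc : Int), 0 ≤ j → (arr.length : Int) - 1 - j ≤ (fuel : Int) →
      solve_day3_part1_loop arr s 1 (PySem.List.pyRange j ((arr.length : Int) - 1) 1) acc =
        acc + refCnt arr (arr.drop (j + 1).toNat) (j + 1) s := by
  intro fuel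
  induction fuel with
  | zero =>
    intro j acc hj hf
    have hge : (arr.length : Int) - 1 ≤ j := by simpa using hf
    rw [PySem.List.pyRange_one_eq_nil hge]
    have : arr.drop (j + 1).toNat = [] := List.drop_eq_nil_of_le (by omega)
    simp [solve_day3_part1_loop, this, refCnt]
  | succ fuel ih =>
    intro j acc hj hf
    by_cases hlt : j < (arr.length : Int) - 1
    · rw [PySem.List.pyRange_one_cons hlt]
      have hcond : ¬ (j + 1) * 1 > (arr.length : Int) - 1 := by omega
      simp only [solve_day3_part1_loop, if_neg hcond]
      rw [ih (j + 1) _ (by omega) (by omega)]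
      have e1 : (j + 1) * 1 = j + 1 := by ring
      rw [e1, drop_toNat_cons arr (j + 1) (by omega) (by omega)]
      simp only [refCnt]
      rw [pyGetD_eq arr (j + 1) (by omega) (by omega)]
      have hidx2 : (j + 1).toNat + 1 = (j + 1 + 1).toNat := by omega
      rw [hidx2, det_eq_isTree]
      ring
    · rw [PySem.List.pyRange_one_eq_nil (by omega)]
      have : arr.drop (j + 1).toNat = [] := List.drop_eq_nil_of_le (by omega)
      simp [solve_day3_part1_loop, this, refCnt]

-- A's loop for the (1,2) slope, started at range index j, is the row-major parity count
lemma loop_eq2 (arr : List String) :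
    ∀ (fuel : Nat) (j acc : Int), 0 ≤ j → (arr.length : Int) - 1 - j ≤ (fuel : Int) →
      solve_day3_part1_loop arr 1 2 (PySem.List.pyRange j ((arr.length : Int) - 1) 1) acc =
        acc + refCnt2 arr (arr.drop (2 * j + 1).toNat) (2 * j + 1) := by
  intro fuel
  induction fuel with
  | zero =>
    intro j acc hj hf
    have hge : (arr.length : Int) - 1 ≤ j := by simpa using hf
    rw [PySem.List.pyRange_one_eq_nil hge]
    have : arr.drop (2 * j + 1).toNat = [] := List.drop_eq_nil_of_le (by omega)
    simp [solve_day3_part1_loop, this, refCnt2]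
  | succ fuel ih =>
    intro j acc hj hf
    by_cases hlt : j < (arr.length : Int) - 1
    · rw [PySem.List.pyRange_one_cons hlt]
      by_cases hcond : (j + 1) * 2 > (arr.length : Int) - 1
      · -- break: no even index remains among rows 2j+1 .. n-1
        simp only [solve_day3_part1_loop, if_pos hcond]
        rw [refCnt2_zero arr _ (2 * j + 1) ?_]
        · ring
        · intro k hk1 hk2 hk3
          have hlen : (arr.drop (2 * j + 1).toNat).length =
              arr.length - (2 * j + 1).toNat := by simp
          omega
      · have hcond' : (j + 1) * 2 ≤ (arr.length : Int) - 1 := by omega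
        simp only [solve_day3_part1_loop, if_neg hcond]
        rw [ih (j + 1) _ (by omega) (by omega)]
        have e2 : (j + 1) * 2 = 2 * j + 2 := by ring
        have e1 : (j + 1) * 1 = j + 1 := by ring
        rw [e2, e1]
        -- unfold two rows of refCnt2: odd 2j+1 contributes 0, even 2j+2 contributes the tree test
        rw [drop_toNat_cons arr (2 * j + 1) (by omega) (by omega)]
        simp only [refCnt2]
        have hodd : (2 * j + 1) % 2 ≠ 0 := by omega
        rw [if_neg (by simpa using hodd)]
        have h1 : (2 * j + 1).toNat + 1 = (2 * j + 2).toNat := by omega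
        have hi2 : (2 * j + 1) + 1 = 2 * j + 2 := by ring
        rw [h1, hi2, drop_toNat_cons arr (2 * j + 2) (by omega) (by omega)]
        simp only [refCnt2]
        have heven : (2 * j + 2) % 2 = 0 := by omega
        have hdiv : PySem.Int.floordiv (2 * j + 2) 2 = j + 1 := by
          rw [PySem.Int.floordiv_eq_ediv_of_pos (by omega)]; omega
        rw [pyGetD_eq arr (2 * j + 2) (by omega) (by omega)]
        have hidx2 : (2 * j + 2).toNat + 1 = (2 * (j + 1) + 1).toNat := by omega
        have hi3 : (2 * j + 2) + 1 = 2 * (j + 1) + 1 := by ring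
        rw [hidx2, hi3, det_eq_isTree]
        simp only [heven, decide_true, Bool.true_and, hdiv]
        split <;> ring
    · rw [PySem.List.pyRange_one_eq_nil (by omega)]
      have : arr.drop (2 * j + 1).toNat = [] := List.drop_eq_nil_of_le (by omega)
      simp [solve_day3_part1_loop, this, refCnt2]

lemma part1_eq1 (arr : List String) (s : Int) :
    solve_day3_part1 arr s 1 = refCnt arr (arr.drop 1) 1 s := by
  have h := loop_eq1 arr s arr.length 0 0 le_rfl (by omega)
  simpa [solve_day3_part1] using h

lemma part1_eq2 (arr : List String) :
    solve_day3_part1 arr 1 2 = refCnt2 arr (arr.drop 1) 1 := by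
  have h := loop_eq2 arr arr.length 0 0 le_rfl (by omega)
  simpa [solve_day3_part1] using h

-- ===== VERDICT (by name: the statement is the Claim_ definition above) =====
theorem solve_day3_part2_spec : Claim_equal_solve_day3_part2 := by
  intro arr _ _
  unfold Spec_solve_day3_part2 solve_day3_part2 solve_day3_part2_alt
  simp only [List.map, List.foldl]
  rw [part1_eq1 arr 1, part1_eq1 arr 3, part1_eq1 arr 5, part1_eq1 arr 7, part1_eq2 arr,
      rowLoop_eq (arr.drop 1) 1 0 0 0 0 0 arr]
  ring
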